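-- pv_equiv track=rewrite | github.com/wuzhenyusjtu/LPCVC20-VideoTextSpotting | Data Efficiency/Non-Text Frame Temporal Rejection and Text Region Aware Spatial Cropping/main.py | get_frm_res
-- ===== SOURCE A (Python) =====
-- def get_frm_res(frms, query, frm2txt):
--     outputs = ""
--     q_cnt = 0
--     if len(frms) == 1:
--         for x in frm2txt[frms[0]]:
--             if x == query and q_cnt == 0:
--                 q_cnt += 1
--                 continue
--             outputs += " {}".format(x)
--     else:
--         for frm in frms:
--             for x in frm2txt[frm]:
--                 if x == query and q_cnt == 0:
--                     q_cnt += 1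
--                     continue
--                 outputs += " {}".format(x)
--     return outputs
-- ===== SOURCE B (Python) =====
-- def get_frm_res(frms, query, frm2txt):
--     tokens = [x for frm in frms for x in frm2txt[frm]]
--     if query in tokens:
--         tokens.remove(query)
--     return ''.join(' {}'.format(x) for x in tokens)
-- ===== Notes on version B (the rewrite author's own statement) =====
-- stated objective: simpler
-- what changed: Replaces the duplicated single-frame/multi-frame loops with in-pass q_cnt skip-tracking by flatten-all-tokens, a single guarded remove of the first query occurrence, then one join.
import Mathlib
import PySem

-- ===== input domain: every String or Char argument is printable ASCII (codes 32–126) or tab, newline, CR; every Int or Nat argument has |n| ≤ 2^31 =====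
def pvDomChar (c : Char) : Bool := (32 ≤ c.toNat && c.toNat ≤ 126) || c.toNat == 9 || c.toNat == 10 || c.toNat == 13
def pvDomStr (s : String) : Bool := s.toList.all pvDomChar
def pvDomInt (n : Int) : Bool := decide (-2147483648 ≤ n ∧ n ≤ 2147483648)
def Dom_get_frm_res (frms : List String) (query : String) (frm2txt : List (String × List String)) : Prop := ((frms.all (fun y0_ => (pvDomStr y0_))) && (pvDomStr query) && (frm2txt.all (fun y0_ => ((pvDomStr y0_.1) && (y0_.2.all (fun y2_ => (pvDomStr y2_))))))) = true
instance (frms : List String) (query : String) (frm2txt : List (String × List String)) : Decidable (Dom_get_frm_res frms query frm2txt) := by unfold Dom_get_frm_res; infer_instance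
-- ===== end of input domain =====

-- B flattens all frame tokens, removes the first query occurrence with one guarded remove, and joins —
-- simpler than A's duplicated single/multi-frame loops with q_cnt skip-tracking; return value proved equal on Pre_.

-- ===== PORT A =====
-- one loop step: 'if x == query and q_cnt == 0: q_cnt += 1; continue' else 'outputs += " {}".format(x)'
def pvStepA (query : String) (st : String × Int) (x : String) : String × Int :=
  if x = query ∧ st.2 = 0 then (st.1, st.2 + 1) else (st.1 ++ " " ++ x, st.2)

-- frm2txt[frm]; Pre_ guarantees the key is present (KeyError otherwise)
def pvTxtOf (frm2txt : List (String × List String)) (frm : String) : List String :=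
  (PySem.Dict.get? ⟨frm2txt⟩ frm).getD []

def get_frm_res (frms : List String) (query : String) (frm2txt : List (String × List String)) : String :=
  if frms.length = 1 then
    ((pvTxtOf frm2txt (frms.headD "")).foldl (pvStepA query) ("", 0)).1
  else
    (frms.foldl (fun st frm => (pvTxtOf frm2txt frm).foldl (pvStepA query) st) ("", 0)).1

-- ===== PORT B =====
def get_frm_res_alt (frms : List String) (query : String) (frm2txt : List (String × List String)) : String :=
  let tokens := frms.flatMap (fun frm => (PySem.Dict.get? ⟨frm2txt⟩ frm).getD [])
  let tokens2 := if tokens.contains query then (PySem.List.remove? tokens query).getD tokens else tokens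
  PySem.Str.join "" (tokens2.map (fun x => " " ++ x))

-- ===== PRECONDITION & SPEC =====
-- Pre_ excludes exactly the inputs on which Python A raises KeyError: some frame of frms is not a key of frm2txt.
def Pre_get_frm_res (frms : List String) (query : String) (frm2txt : List (String × List String)) : Prop :=
  ∀ frm ∈ frms, (PySem.Dict.get? ⟨frm2txt⟩ frm).isSome = true
instance (frms : List String) (query : String) (frm2txt : List (String × List String)) : Decidable (Pre_get_frm_res frms query frm2txt) := by unfold Pre_get_frm_res; infer_instance

def pvWitness_get_frm_res : List String × String × (List (String × List String)) :=
  (["f1", "f2"], "q", [("f1", ["a", "q", "b"]), ("f2", ["q", "c"])])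

def Spec_get_frm_res (frms : List String) (query : String) (frm2txt : List (String × List String)) (out : String) : Prop := out = get_frm_res_alt frms query frm2txt
instance (frms : List String) (query : String) (frm2txt : List (String × List String)) (out : String) : Decidable (Spec_get_frm_res frms query frm2txt out) := by unfold Spec_get_frm_res; infer_instance

-- ===== CLAIM (what is proved, stated in full; the proofs are below) =====
def Claim_equal_get_frm_res : Prop := ∀ (frms : List String) (query : String) (frm2txt : List (String × List String)), Dom_get_frm_res frms query frm2txt → Pre_get_frm_res frms query frm2txt → Spec_get_frm_res frms query frm2txt (get_frm_res frms query frm2txt)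

-- ===== LEMMAS AND PROOFS =====

-- join of " "-prefixed tokens, the shape of B's output
def pvJ (ts : List String) : String := PySem.Str.join "" (ts.map (fun x => " " ++ x))

theorem pvJ_nil : pvJ [] = "" := by
  simp [pvJ, PySem.Str.join]

theorem ofList_cons_space (l : List Char) : String.ofList (' ' :: l) = " " ++ String.ofList l := by
  rw [show (' ' :: l) = [' '] ++ l from rfl, String.ofList_append]

theorem pvJ_cons (x : String) (ts : List String) : pvJ (x :: ts) = " " ++ x ++ pvJ ts := by
  cases ts with
  | nil =>
      simp only [pvJ, PySem.Str.join, List.map_cons, List.map_nil, PySem.Chars.join_singleton, PySem.Chars.join_nil]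
      have : (" " ++ x).toList = ' ' :: x.toList := by simp
      rw [this, ofList_cons_space]
      simp
  | cons b bs =>
      simp only [pvJ, PySem.Str.join, List.map_cons, PySem.Chars.join_cons_cons]
      have : (" " ++ x).toList = ' ' :: x.toList := by simp
      simp only [this, show ("".toList : List Char) = [] from rfl, List.append_nil, List.cons_append]
      rw [ofList_cons_space, String.ofList_append]
      simp [String.append_assoc]

theorem foldA_pos (query : String) (ts : List String) (acc : String) (q : Int) (h : q ≠ 0) :
    ts.foldl (pvStepA query) (acc, q) = (acc ++ pvJ ts, q) := by
  induction ts generalizing acc with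
  | nil => simp [pvJ_nil]
  | cons x ts ih =>
      simp only [List.foldl_cons, pvStepA, h, and_false, if_false]
      rw [ih, pvJ_cons]
      simp [String.append_assoc]

theorem foldA_zero (query : String) (ts : List String) (acc : String) :
    ts.foldl (pvStepA query) (acc, 0) =
      if query ∈ ts then (acc ++ pvJ (ts.erase query), 1) else (acc ++ pvJ ts, 0) := by
  induction ts generalizing acc with
  | nil => simp [pvJ_nil]
  | cons x ts ih =>
      by_cases hx : x = query
      · have hstep : pvStepA query (acc, 0) x = (acc, 1) := by simp [pvStepA, hx]
        rw [List.foldl_cons, hstep, foldA_pos query ts acc 1 one_ne_zero]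
        subst hx
        simp [List.erase_cons_head]
      · simp only [List.foldl_cons, pvStepA]
        rw [if_neg (by simp [hx])]
        rw [ih]
        have he : (x :: ts).erase query = x :: ts.erase query := List.erase_cons_tail (by simp [hx])
        by_cases hm : query ∈ ts
        · rw [if_pos hm, if_pos (by simp [hm]), he, pvJ_cons]
          simp [String.append_assoc]
        · have hnm : query ∉ x :: ts := by
            intro h
            rcases List.mem_cons.mp h with h | h
            · exact hx h.symm
            · exact hm h
          rw [if_neg hm, if_neg hnm, pvJ_cons]
          simp [String.append_assoc]

theorem flat_singleton (frm2txt : List (String × List String)) (f : String) :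
    [f].flatMap (fun frm => (PySem.Dict.get? ⟨frm2txt⟩ frm).getD []) = pvTxtOf frm2txt f := by
  simp [pvTxtOf]

theorem alt_eq_fold (frms : List String) (query : String) (frm2txt : List (String × List String)) :
    get_frm_res_alt frms query frm2txt =
      ((frms.flatMap (fun frm => (PySem.Dict.get? ⟨frm2txt⟩ frm).getD [])).foldl
        (pvStepA query) ("", 0)).1 := by
  set tokens := frms.flatMap (fun frm => (PySem.Dict.get? ⟨frm2txt⟩ frm).getD []) with ht
  rw [foldA_zero]
  by_cases hm : query ∈ tokens
  · have hc : tokens.contains query = true := by simpa using hm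
    rw [get_frm_res_alt]
    simp only [← ht, hc, if_pos hm, if_true]
    rw [PySem.List.remove?_eq_some_erase tokens query hm]
    simp [pvJ]
  · have hc : tokens.contains query = false := by simpa using hm
    rw [get_frm_res_alt]
    simp only [← ht, hc, if_neg hm, Bool.false_eq_true, if_false]
    simp [pvJ]

theorem foldl_flat (frms : List String) (query : String) (frm2txt : List (String × List String)) (init : String × Int) :
    (frms.flatMap (fun frm => (PySem.Dict.get? ⟨frm2txt⟩ frm).getD [])).foldl (pvStepA query) init =
      frms.foldl (fun st frm => (pvTxtOf frm2txt frm).foldl (pvStepA query) st) init := by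
  induction frms generalizing init with
  | nil => rfl
  | cons f fs ih => simp [List.flatMap_cons, List.foldl_append, ih, pvTxtOf]

-- ===== VERDICT (by name: the statement is the Claim_ definition above) =====
theorem get_frm_res_spec : Claim_equal_get_frm_res := by
  intro frms query frm2txt _ _
  unfold Spec_get_frm_res
  rw [alt_eq_fold]
  unfold get_frm_res
  by_cases h1 : frms.length = 1
  · obtain ⟨f, rfl⟩ : ∃ f, frms = [f] := by
      match frms, h1 with
      | [f], _ => exact ⟨f, rfl⟩
    rw [if_pos h1, flat_singleton]
    rfl
  · rw [if_neg h1, foldl_flat]
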